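-- pv_equiv track=rewrite | github.com/kergene/advent-code | 2015/code_day_17.py | count_min_sums
-- ===== SOURCE A (Python) =====
-- from math import prod
-- from itertools import product
--
-- def count_min_sums(data):
--     target = 150
--     min_containers = len(data)
--     for i in product((0,1), repeat=len(data)):
--         if sum(prod(j) for j in zip(i, data)) == target:
--             min_containers = min(min_containers, sum(i))
--     counter = 0
--     for binary in product((0,1), repeat=len(data)):
--         if sum(binary) == min_containers:
--             if sum(prod(j) for j in zip(binary, data)) == target:
--                 counter += 1
--     return counter
-- ===== SOURCE B (Python) =====
-- def count_min_sums(data):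
--     target = 150
--     # DP over states (containers used, sum): ways[(k, s)] = number of subsets
--     # of the items seen so far having size k and sum s.
--     ways = {(0, 0): 1}
--     for x in data:
--         nxt = dict(ways)
--         for (k, s), w in ways.items():
--             key = (k + 1, s + x)
--             nxt[key] = nxt.get(key, 0) + w
--         ways = nxt
--     best = None
--     for (k, s) in ways:
--         if s == target and (best is None or k < best):
--             best = k
--     return ways[(best, target)] if best is not None else 0
-- ===== Notes on version B (the rewrite author's own statement) =====
-- stated objective: alternative
-- what changed: Replaces the double enumeration of all 2^n binary tuples with a single subset-sum dynamic program over a dict of (containers-used, sum) states, then reads the minimal container count and its multiplicity from the state table (much faster when subset sums collide, e.g. bounded values; same worst case on adversarial random ints).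
import Mathlib
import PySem

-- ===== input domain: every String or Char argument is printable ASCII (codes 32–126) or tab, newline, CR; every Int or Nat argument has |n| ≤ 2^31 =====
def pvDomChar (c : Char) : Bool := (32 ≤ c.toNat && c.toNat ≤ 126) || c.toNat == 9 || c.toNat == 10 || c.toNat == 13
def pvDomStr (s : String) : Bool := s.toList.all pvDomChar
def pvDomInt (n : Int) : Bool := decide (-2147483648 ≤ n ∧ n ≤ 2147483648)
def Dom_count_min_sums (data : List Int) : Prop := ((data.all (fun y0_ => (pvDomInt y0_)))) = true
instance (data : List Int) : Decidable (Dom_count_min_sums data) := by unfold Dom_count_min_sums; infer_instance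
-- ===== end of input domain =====

-- B replaces A's double 2^n enumeration of binary tuples by a subset-sum dynamic program over
-- a dict of (containers-used, sum) states; the return values are proved equal on all inputs.

-- ===== PORT A =====
-- itertools.product((0,1), repeat=n), in CPython's order (leftmost coordinate varies slowest)
def prod01 : Nat → List (List Int)
  | 0 => [[]]
  | n + 1 => (prod01 n).map (fun t => (0 : Int) :: t) ++ (prod01 n).map (fun t => (1 : Int) :: t)

def count_min_sums (data : List Int) : Int :=
  let target : Int := 150
  let mc : Int :=
    (prod01 data.length).foldl
      (fun m i => if ((i.zip data).map (fun j => j.1 * j.2)).sum = target then min m i.sum else m)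
      (data.length : Int)
  (prod01 data.length).foldl
    (fun c b => if b.sum = mc then
        (if ((b.zip data).map (fun j => j.1 * j.2)).sum = target then c + 1 else c)
      else c)
    0

-- ===== PORT B =====
-- one DP step: fold over ways.items(), adding each state's count at the shifted key
def altStep (ways : PySem.Dict (Int × Int) Int) (x : Int) : PySem.Dict (Int × Int) Int :=
  ways.items.foldl
    (fun nxt p => nxt.insert (p.1.1 + 1, p.1.2 + x) (nxt.getD (p.1.1 + 1, p.1.2 + x) 0 + p.2))
    ways

-- the 'best' scan: if s == target and (best is None or k < best): best = k
def altBest (best : Option Int) (p : Int × Int) : Option Int :=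
  if p.2 == 150 && (match best with | none => true | some b => decide (p.1 < b)) then some p.1 else best

def count_min_sums_alt (data : List Int) : Int :=
  let ways := data.foldl altStep ((PySem.Dict.empty).insert ((0 : Int), (0 : Int)) (1 : Int))
  match ways.keys.foldl altBest none with
  | some b => ways.getD (b, 150) 0
  | none => 0

-- ===== PRECONDITION & SPEC =====
def Spec_count_min_sums (data : List Int) (out : Int) : Prop := out = count_min_sums_alt data
instance (data : List Int) (out : Int) : Decidable (Spec_count_min_sums data out) := by unfold Spec_count_min_sums; infer_instance

-- ===== CLAIM (what is proved, stated in full; the proofs are below) =====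
def Claim_equal_count_min_sums : Prop := ∀ (data : List Int), Dom_count_min_sums data → Spec_count_min_sums data (count_min_sums data)

-- ===== LEMMAS AND PROOFS =====

-- the list of (size, sum) over all subsets, in A's (head-recursive) order
def Mdl : List Int → List (Int × Int)
  | [] => [((0 : Int), (0 : Int))]
  | x :: xs => Mdl xs ++ (Mdl xs).map (fun p => (p.1 + 1, p.2 + x))

-- number of subsets of l with size q.1 and sum q.2
def cnt : List Int → (Int × Int) → Nat
  | [], q => if q = ((0 : Int), (0 : Int)) then 1 else 0
  | x :: xs, q => cnt xs q + cnt xs (q.1 - 1, q.2 - x)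

theorem count_Mdl (l : List Int) (q : Int × Int) : (Mdl l).count q = cnt l q := by
  induction l generalizing q with
  | nil =>
    by_cases h : q = ((0 : Int), (0 : Int))
    · simp [Mdl, cnt, h]
    · rw [Mdl, cnt, if_neg h, List.count_eq_zero]
      simp [h]
  | cons x xs ih =>
    have hinj : Function.Injective (fun p : Int × Int => (p.1 + 1, p.2 + x)) := by
      intro a b h; simp [Prod.ext_iff] at h ⊢; omega
    have hq : q = (fun p : Int × Int => (p.1 + 1, p.2 + x)) (q.1 - 1, q.2 - x) := by
      simp
    simp only [Mdl, cnt, List.count_append, ih]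
    congr 1
    conv_lhs => rw [hq]
    rw [List.count_map_of_injective _ _ hinj, ih]

theorem mem_Mdl_iff (l : List Int) (q : Int × Int) : q ∈ Mdl l ↔ 0 < cnt l q := by
  rw [← count_Mdl]; exact List.count_pos_iff.symm

theorem Mdl_bounds (l : List Int) (q : Int × Int) (h : q ∈ Mdl l) : 0 ≤ q.1 ∧ q.1 ≤ (l.length : Int) := by
  induction l generalizing q with
  | nil => simp [Mdl] at h; simp [h]
  | cons x xs ih =>
    simp only [Mdl, List.mem_append, List.mem_map] at h
    rcases h with h | ⟨p, hp, rfl⟩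
    · have := ih q h; simp at this ⊢; omega
    · have := ih p hp; simp at this ⊢; omega

-- A's pairs list is exactly Mdl
theorem pairsA_eq_Mdl (l : List Int) :
    (prod01 l.length).map (fun i => (i.sum, ((i.zip l).map (fun j => j.1 * j.2)).sum)) = Mdl l := by
  induction l with
  | nil => simp [prod01, Mdl]
  | cons x xs ih =>
    simp only [List.length_cons, prod01, List.map_append, List.map_map, Mdl, ← ih, List.map_map]
    congr 1
    · apply List.map_congr_left
      intro t ht
      simp
    · apply List.map_congr_left
      intro t ht
      simp [Function.comp]
      constructor <;> ring

-- the DP invariant: the dict stores exactly the nonzero state counts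
def DPInvC (d : PySem.Dict (Int × Int) Int) (c : (Int × Int) → Nat) : Prop :=
  d.keys.Nodup ∧ (∀ q, d.getD q 0 = (c q : Int)) ∧ (∀ q, q ∈ d.keys ↔ 0 < c q)

-- fold of insert-add over pairs with distinct target keys
theorem getD_foldl_insert_add (l : List ((Int × Int) × Int)) (x : Int)
    (d : PySem.Dict (Int × Int) Int) (q : Int × Int)
    (hnd : (l.map (fun p => ((p.1.1 + 1 : Int), (p.1.2 + x : Int)))).Nodup) :
    (l.foldl (fun e p => e.insert (p.1.1 + 1, p.1.2 + x) (e.getD (p.1.1 + 1, p.1.2 + x) 0 + p.2)) d).getD q 0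
      = d.getD q 0 + ((l.filter (fun p => ((p.1.1 + 1 : Int), (p.1.2 + x : Int)) == q)).map (·.2)).sum := by
  induction l generalizing d with
  | nil => simp
  | cons p l ih =>
    simp only [List.map_cons, List.nodup_cons] at hnd
    obtain ⟨hni, hnd⟩ := hnd
    simp only [List.foldl_cons, List.filter_cons]
    rw [ih _ hnd]
    by_cases hk : ((p.1.1 + 1 : Int), (p.1.2 + x : Int)) = q
    · have hfil : l.filter (fun p' => ((p'.1.1 + 1 : Int), (p'.1.2 + x : Int)) == q) = [] := by
        rw [List.filter_eq_nil_iff]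
        intro a ha
        simp only [beq_iff_eq]
        intro hc
        exact hni (by rw [← hk] at hc; exact hc ▸ List.mem_map_of_mem ha)
      rw [hfil]
      simp only [hk, beq_self_eq_true, if_pos trivial]
      rw [PySem.Dict.getD_insert_self]
      simp
    · have : (((p.1.1 + 1 : Int), (p.1.2 + x : Int)) == q) = false := by
        simp [hk]
      rw [this]
      rw [PySem.Dict.getD_insert_of_ne (hne := fun h => hk h.symm)]
      simp

theorem sum_filter_items (l : List ((Int × Int) × Int)) (k : Int × Int)
    (h : (l.map (·.1)).Nodup) :
    ((l.filter (fun p => p.1 == k)).map (·.2)).sum = (PySem.Dict.mk l).getD k 0 := by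
  induction l with
  | nil => simp [PySem.Dict.getD_eq_get?_getD, PySem.Dict.get?]
  | cons p l ih =>
    simp only [List.map_cons, List.nodup_cons] at h
    obtain ⟨hni, hnd⟩ := h
    rw [PySem.Dict.getD_eq_get?_getD, PySem.Dict.get?_mk_cons]
    by_cases hk : p.1 = k
    · have hfil : l.filter (fun p' => p'.1 == k) = [] := by
        rw [List.filter_eq_nil_iff]
        intro a ha
        simp only [beq_iff_eq]
        intro hc
        exact hni (hk ▸ hc ▸ List.mem_map_of_mem ha)
      simp [hk, hfil]
    · have hne : (p.1 == k) = false := by simp [hk]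
      simp only [List.filter_cons, hne, Bool.false_eq_true]
      exact ih hnd

theorem inv_step (x : Int) (c : (Int × Int) → Nat) (d : PySem.Dict (Int × Int) Int)
    (h : DPInvC d c) :
    DPInvC (altStep d x) (fun q => c q + c (q.1 - 1, q.2 - x)) := by
  obtain ⟨hnd, hval, hmem⟩ := h
  have hinj : Function.Injective (fun p : Int × Int => ((p.1 + 1 : Int), (p.2 + x : Int))) := by
    intro a b hab; simp [Prod.ext_iff] at hab ⊢; omega
  have hkeys : d.items.map (fun p => ((p.1.1 + 1 : Int), (p.1.2 + x : Int)))
      = d.keys.map (fun p => (p.1 + 1, p.2 + x)) := by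
    simp [PySem.Dict.keys, List.map_map, Function.comp]
  have hmnd : (d.items.map (fun p => ((p.1.1 + 1 : Int), (p.1.2 + x : Int)))).Nodup := by
    rw [hkeys]; exact hnd.map hinj
  refine ⟨?_, ?_, ?_⟩
  · exact PySem.Dict.nodup_keys_foldl_insert_key d.items
      (fun p => ((p.1.1 + 1 : Int), (p.1.2 + x : Int)))
      (fun e p => e.getD (p.1.1 + 1, p.1.2 + x) 0 + p.2) d hnd
  · intro q
    rw [altStep, getD_foldl_insert_add d.items x d q hmnd]
    have hcong : d.items.filter (fun p => ((p.1.1 + 1 : Int), (p.1.2 + x : Int)) == q)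
        = d.items.filter (fun p => p.1 == ((q.1 - 1 : Int), (q.2 - x : Int))) := by
      apply List.filter_congr
      intro a _
      rcases a with ⟨⟨a1, a2⟩, v⟩
      rcases q with ⟨q1, q2⟩
      rw [Bool.eq_iff_iff]
      simp only [beq_iff_eq, Prod.mk.injEq]
      constructor <;> (intro hh; constructor <;> omega)
    rw [hcong, sum_filter_items d.items _ (by exact hnd)]
    have hd : PySem.Dict.mk d.items = d := by cases d; rfl
    rw [hd, hval, hval]
    exact (Nat.cast_add _ _).symm
  · intro q
    rw [altStep, PySem.Dict.keys_foldl_insert_key, PySem.Set.mem_update]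
    have h2 : q ∈ d.items.map (fun p => ((p.1.1 + 1 : Int), (p.1.2 + x : Int)))
        ↔ ((q.1 - 1 : Int), (q.2 - x : Int)) ∈ d.keys := by
      rw [hkeys]
      simp only [List.mem_map]
      constructor
      · rintro ⟨p, hp, rfl⟩
        simpa using hp
      · intro hq
        exact ⟨_, hq, by simp⟩
    rw [h2, hmem, hmem]
    show (0 < c q ∨ 0 < c (q.1 - 1, q.2 - x)) ↔ 0 < c q + c (q.1 - 1, q.2 - x)
    omega

-- the abstract DP step on count functions
def cstep (c : (Int × Int) → Nat) (x : Int) : (Int × Int) → Nat :=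
  fun q => c q + c (q.1 - 1, q.2 - x)

theorem fold_inv (l : List Int) (d : PySem.Dict (Int × Int) Int) (c : (Int × Int) → Nat)
    (h : DPInvC d c) : DPInvC (l.foldl altStep d) (l.foldl cstep c) := by
  induction l generalizing d c with
  | nil => exact h
  | cons x l ih => exact ih _ _ (inv_step x c d h)

theorem foldl_cstep_comm (l : List Int) (c : (Int × Int) → Nat) (x : Int) :
    l.foldl cstep (cstep c x) = cstep (l.foldl cstep c) x := by
  induction l generalizing c with
  | nil => rfl
  | cons y l ih =>
    have hcomm : cstep (cstep c x) y = cstep (cstep c y) x := by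
      funext q
      simp only [cstep]
      have h : (q.2 - y - x : Int) = q.2 - x - y := by ring
      have h' : (q.1 - 1 - 1 : Int) = q.1 - 1 - 1 := rfl
      rw [h]
      omega
    simp only [List.foldl_cons]
    rw [hcomm]
    exact ih (cstep c y)

theorem foldl_cstep_eq_cnt (l : List Int) :
    l.foldl cstep (fun q => if q = ((0 : Int), (0 : Int)) then 1 else 0) = cnt l := by
  induction l with
  | nil => rfl
  | cons x l ih =>
    simp only [List.foldl_cons]
    rw [foldl_cstep_comm, ih]
    funext q
    simp [cstep, cnt]

theorem inv_final (data : List Int) :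
    DPInvC (data.foldl altStep ((PySem.Dict.empty).insert ((0 : Int), (0 : Int)) (1 : Int)))
      (cnt data) := by
  have h0 : DPInvC ((PySem.Dict.empty).insert ((0 : Int), (0 : Int)) (1 : Int))
      (fun q => if q = ((0 : Int), (0 : Int)) then 1 else 0) := by
    refine ⟨?_, ?_, ?_⟩
    · simp [PySem.Dict.keys, PySem.Dict.insert, PySem.Dict.empty]
    · intro q
      by_cases h : q = ((0 : Int), (0 : Int))
      · subst h; rw [PySem.Dict.getD_insert_self]; simp
      · rw [PySem.Dict.getD_insert_of_ne (hne := h), PySem.Dict.getD_empty]; simp [h]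
    · intro q
      by_cases h : q = ((0 : Int), (0 : Int)) <;>
        simp [PySem.Dict.keys, PySem.Dict.insert, PySem.Dict.empty, h]
  have := fold_inv data _ _ h0
  rwa [foldl_cstep_eq_cnt] at this

-- the minimal-size candidates on the A side
def LAlist (data : List Int) : List Int :=
  ((Mdl data).filter (fun p => decide (p.2 = 150))).map (·.1)

def mcVal (data : List Int) : Int := (LAlist data).foldl min (data.length : Int)

theorem altBest_some (K : List (Int × Int)) (b : Int) :
    K.foldl altBest (some b)
      = some (((K.filter (fun p => p.2 == 150)).map (·.1)).foldl min b) := by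
  induction K generalizing b with
  | nil => simp
  | cons p K ih =>
    by_cases h150 : p.2 = 150
    · by_cases hlt : p.1 < b
      · simp only [List.foldl_cons, List.filter_cons]
        simp [altBest, h150, hlt]
        rw [ih]
        congr 1
        rw [min_eq_right (le_of_lt hlt)]
      · simp only [List.foldl_cons, List.filter_cons]
        simp [altBest, h150, hlt]
        rw [ih]
        congr 1
        rw [min_eq_left (by omega)]
    · simp only [List.foldl_cons, List.filter_cons]
      simp [altBest, h150]
      exact ih b

theorem altBest_none (K : List (Int × Int)) :
    K.foldl altBest none
      = match (K.filter (fun p => p.2 == 150)).map (·.1) with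
        | [] => none
        | k :: t => some (t.foldl min k) := by
  induction K with
  | nil => simp
  | cons p K ih =>
    by_cases h150 : p.2 = 150
    · simp only [List.foldl_cons, List.filter_cons]
      simp [altBest, h150]
      rw [altBest_some]
    · simp only [List.foldl_cons, List.filter_cons]
      simp [altBest, h150]
      exact ih

-- A's first loop computes mcVal
theorem A_mc (data : List Int) :
    (prod01 data.length).foldl
        (fun m i => if ((i.zip data).map (fun j => j.1 * j.2)).sum = (150 : Int) then min m i.sum else m)
        (data.length : Int)
      = mcVal data := by
  have h1 : (prod01 data.length).foldl
        (fun m i => if ((i.zip data).map (fun j => j.1 * j.2)).sum = (150 : Int) then min m i.sum else m)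
        (data.length : Int)
      = (Mdl data).foldl (fun m p => if p.2 = 150 then min m p.1 else m) (data.length : Int) := by
    rw [← pairsA_eq_Mdl, List.foldl_map]
  rw [h1, PySem.List.foldl_ite_eq_foldl_filter, mcVal, LAlist, ← List.foldl_map]

-- A's second loop counts cnt data (mc, 150)
theorem A_counter (data : List Int) (mc : Int) :
    (prod01 data.length).foldl
        (fun c b => if b.sum = mc then
            (if ((b.zip data).map (fun j => j.1 * j.2)).sum = (150 : Int) then c + 1 else c)
          else c)
        0
      = (cnt data (mc, 150) : Int) := by
  have h1 : (prod01 data.length).foldl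
        (fun c b => if b.sum = mc then
            (if ((b.zip data).map (fun j => j.1 * j.2)).sum = (150 : Int) then c + 1 else c)
          else c)
        (0 : Int)
      = (Mdl data).foldl (fun c p => if p.1 = mc then (if p.2 = 150 then c + 1 else c) else c) (0 : Int) := by
    rw [← pairsA_eq_Mdl, List.foldl_map]
  refine h1.trans ?_
  have h2 : (Mdl data).foldl (fun c p => if p.1 = mc then (if p.2 = 150 then c + 1 else c) else c) (0 : Int)
      = (Mdl data).foldl (fun c p => if p = ((mc : Int), (150 : Int)) then c + 1 else c) (0 : Int) := by
    apply PySem.List.foldl_congr_mem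
    intro acc p _
    rcases p with ⟨p1, p2⟩
    by_cases h1' : p1 = mc <;> by_cases h2' : p2 = 150 <;>
      simp [h1', h2', Prod.ext_iff]
  refine h2.trans ?_
  rw [PySem.List.foldl_ite_add_one, zero_add]
  congr 1
  rw [← count_Mdl]
  rw [List.count]
  apply List.countP_congr
  intro p _
  simp [Prod.ext_iff]

-- membership bridge between B's candidate list and A's
theorem mem_cand (K : List (Int × Int)) (k : Int) :
    k ∈ (K.filter (fun p => p.2 == 150)).map (·.1) ↔ ((k : Int), (150 : Int)) ∈ K := by
  simp only [List.mem_map, List.mem_filter, beq_iff_eq]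
  constructor
  · rintro ⟨p, ⟨hp, h150⟩, rfl⟩
    have : p = (p.1, (150 : Int)) := by
      rcases p with ⟨a, b⟩; simp at h150 ⊢; exact h150
    rwa [← this]
  · intro h
    exact ⟨((k : Int), (150 : Int)), ⟨h, rfl⟩, rfl⟩

theorem mem_LAlist (data : List Int) (k : Int) :
    k ∈ LAlist data ↔ ((k : Int), (150 : Int)) ∈ Mdl data := by
  unfold LAlist
  simp only [List.mem_map, List.mem_filter, decide_eq_true_eq]
  constructor
  · rintro ⟨p, ⟨hp, h150⟩, rfl⟩
    have : p = (p.1, (150 : Int)) := by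
      rcases p with ⟨a, b⟩; simp at h150 ⊢; exact h150
    rwa [← this]
  · intro h
    exact ⟨((k : Int), (150 : Int)), ⟨h, rfl⟩, rfl⟩

-- ===== VERDICT (by name: the statement is the Claim_ definition above) =====
theorem count_min_sums_spec : Claim_equal_count_min_sums := by
  intro data _
  show count_min_sums data = count_min_sums_alt data
  obtain ⟨hnd, hval, hmem⟩ := inv_final data
  simp only [count_min_sums, count_min_sums_alt]
  rw [A_mc, A_counter, altBest_none]
  set K := (data.foldl altStep ((PySem.Dict.empty).insert ((0 : Int), (0 : Int)) (1 : Int))).keys with hK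
  have hbridge : ∀ k : Int, k ∈ (K.filter (fun p => p.2 == 150)).map (·.1) ↔ k ∈ LAlist data := by
    intro k
    rw [mem_cand, mem_LAlist, hmem, ← mem_Mdl_iff]
  rcases hcase : (K.filter (fun p => p.2 == 150)).map (·.1) with _ | ⟨k0, t⟩
  · -- no subset sums to 150: both sides return 0
    rw [hcase]
    have hno : ∀ k : Int, ¬ k ∈ LAlist data := by
      intro k hk
      have := (hbridge k).mpr hk
      rw [hcase] at this
      simp at this
    have hz : cnt data (mcVal data, 150) = 0 := by
      by_contra h
      have hpos : 0 < cnt data (mcVal data, 150) := Nat.pos_of_ne_zero h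
      exact hno _ ((mem_LAlist data _).mpr ((mem_Mdl_iff data _).mpr hpos))
    rw [hz]
    rfl
  · -- a subset sums to 150: the minimal sizes agree, then both read the same count
    rw [hcase]
    show (cnt data (mcVal data, 150) : Int)
        = (data.foldl altStep ((PySem.Dict.empty).insert ((0 : Int), (0 : Int)) (1 : Int))).getD
            (t.foldl min k0, 150) 0
    rw [hval]
    set m := t.foldl min k0 with hm
    have hmmem : m ∈ (K.filter (fun p => p.2 == 150)).map (·.1) := by
      rw [hcase]
      rcases PySem.List.foldl_min_mem t k0 with h | h
      · rw [hm, h]; exact List.mem_cons_self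
      · exact List.mem_cons_of_mem _ (hm ▸ h)
    have hmLA : m ∈ LAlist data := (hbridge m).mp hmmem
    have hmlb : ∀ a : Int, a ∈ (K.filter (fun p => p.2 == 150)).map (·.1) → m ≤ a := by
      intro a ha
      rw [hcase] at ha
      rcases List.mem_cons.mp ha with rfl | ha
      · exact (PySem.List.foldl_min_le t a).1
      · exact (PySem.List.foldl_min_le t k0).2 a ha
    have hmc_le_m : mcVal data ≤ m := (PySem.List.foldl_min_le (LAlist data) _).2 m hmLA
    have hm_le_mc : m ≤ mcVal data := by
      rcases PySem.List.foldl_min_mem (LAlist data) ((data.length : Int)) with h | h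
      · have hb := (Mdl_bounds data _ ((mem_LAlist data m).mp hmLA)).2
        rw [mcVal, h]
        exact hb
      · exact hmlb _ ((hbridge _).mpr h)
    rw [le_antisymm hmc_le_m hm_le_mc]
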